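-- pv_equiv track=rewrite | github.com/MikeChuv/DataProtection | Lab06/src/ChangePasswordDialog.py | passwordFits
-- ===== SOURCE A (Python) =====
-- def passwordFits(password : str):
-- 	# Вариант 48: Чередование букв, знаков арифметических операций, цифр.
-- 	letterFlag = False
-- 	opFlag = False
-- 	digitFlag = False
-- 	for ch in password:
-- 		if ch.isalpha(): letterFlag = True
-- 		elif ch in ('+', '-', '*', '/') and letterFlag: opFlag = True
-- 		elif ch.isdigit() and opFlag: digitFlag = True;
-- 	if letterFlag and opFlag and digitFlag: return True
-- 	else: return False
-- ===== SOURCE B (Python) =====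
-- def passwordFits(password: str):
--     n = len(password)
--     i = next((k for k in range(n) if password[k].isalpha()), None)
--     if i is None:
--         return False
--     j = next((k for k in range(i + 1, n) if password[k] in ('+', '-', '*', '/')), None)
--     if j is None:
--         return False
--     return any(password[k].isdigit() for k in range(j + 1, n))
-- ===== Notes on version B (the rewrite author's own statement) =====
-- stated objective: alternative
-- what changed: Replaces the single flag-maintaining pass (three booleans updated via an elif chain) with three explicit suffix searches: find the first letter, then the first arithmetic operator strictly after it, then any digit strictly after that, each via next()/any() with offset start positions and no flags.
import Mathlib
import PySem

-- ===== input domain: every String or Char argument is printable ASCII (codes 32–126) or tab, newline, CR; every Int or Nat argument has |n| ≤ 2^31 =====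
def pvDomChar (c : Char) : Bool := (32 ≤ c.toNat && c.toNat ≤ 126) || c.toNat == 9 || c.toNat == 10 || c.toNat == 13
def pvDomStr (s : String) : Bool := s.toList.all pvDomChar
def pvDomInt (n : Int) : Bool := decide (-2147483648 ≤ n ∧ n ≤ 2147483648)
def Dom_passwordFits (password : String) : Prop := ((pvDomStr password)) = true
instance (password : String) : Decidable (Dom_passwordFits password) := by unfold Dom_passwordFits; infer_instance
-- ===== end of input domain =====

-- B replaces A's flag-maintaining single pass with three explicit suffix searches (alternative decomposition, same cost).

-- ===== PORT A =====
-- one loop over the characters, updating three flags via an elif chain, exactly as A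
def pvStepA (s : Bool × Bool × Bool) (ch : Char) : Bool × Bool × Bool :=
  if PySem.Chars.isalpha ch then (true, s.2.1, s.2.2)
  else if (ch == '+' || ch == '-' || ch == '*' || ch == '/') && s.1 then (s.1, true, s.2.2)
  else if PySem.Chars.isdigit ch && s.2.1 then (s.1, s.2.1, true)
  else s

def passwordFits (password : String) : Bool :=
  let st := password.toList.foldl pvStepA (false, false, false)
  if st.1 && st.2.1 && st.2.2 then true else false

-- ===== PORT B =====
-- scan to the first letter and return the suffix after it (B's first next())
def pvSkipAlpha : List Char → Option (List Char)
  | [] => none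
  | c :: cs => if PySem.Chars.isalpha c then some cs else pvSkipAlpha cs

-- scan to the first arithmetic-operator char and return the suffix after it (B's second next())
def pvSkipOp : List Char → Option (List Char)
  | [] => none
  | c :: cs => if c == '+' || c == '-' || c == '*' || c == '/' then some cs else pvSkipOp cs

-- any(… .isdigit() …) over the remaining suffix
def pvAnyDigit (cs : List Char) : Bool := cs.any PySem.Chars.isdigit

def passwordFits_alt (password : String) : Bool :=
  match pvSkipAlpha password.toList with
  | none => false
  | some r1 =>
    match pvSkipOp r1 with
    | none => false
    | some r2 => pvAnyDigit r2

-- ===== PRECONDITION & SPEC =====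
def Spec_passwordFits (password : String) (out : Bool) : Prop := out = passwordFits_alt password
instance (password : String) (out : Bool) : Decidable (Spec_passwordFits password out) := by unfold Spec_passwordFits; infer_instance

-- ===== CLAIM (what is proved, stated in full; the proofs are below) =====
def Claim_equal_passwordFits : Prop := ∀ (password : String), Dom_passwordFits password → Spec_passwordFits password (passwordFits password)

-- ===== LEMMAS AND PROOFS =====
def pvFin (s : Bool × Bool × Bool) : Bool := s.1 && s.2.1 && s.2.2

theorem pv_op_not_alpha {c : Char} (h : (c == '+' || c == '-' || c == '*' || c == '/') = true) :
    PySem.Chars.isalpha c = false := by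
  simp only [Bool.or_eq_true, beq_iff_eq] at h
  rcases h with ((h | h) | h) | h <;> subst h <;> decide

theorem pv_op_not_digit {c : Char} (h : (c == '+' || c == '-' || c == '*' || c == '/') = true) :
    PySem.Chars.isdigit c = false := by
  simp only [Bool.or_eq_true, beq_iff_eq] at h
  rcases h with ((h | h) | h) | h <;> subst h <;> decide

theorem pv_alpha_not_digit {c : Char} (h : PySem.Chars.isalpha c = true) :
    PySem.Chars.isdigit c = false := by
  simp only [PySem.Chars.isalpha, PySem.Chars.isupper, PySem.Chars.islower,
    PySem.Chars.isdigit, Bool.or_eq_true, Bool.and_eq_true, decide_eq_true_eq] at h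
  have hle : ∀ a b : Char, a ≤ b ↔ a.toNat ≤ b.toNat := fun a b => Iff.rfl
  simp only [PySem.Chars.isdigit, Bool.and_eq_false_iff, decide_eq_false_iff_not, hle,
    show ('0' : Char).toNat = 48 from rfl, show ('9' : Char).toNat = 57 from rfl,
    show ('A' : Char).toNat = 65 from rfl, show ('Z' : Char).toNat = 90 from rfl,
    show ('a' : Char).toNat = 97 from rfl, show ('z' : Char).toNat = 122 from rfl] at h ⊢
  omega

theorem pv_fold_ttt (cs : List Char) : List.foldl pvStepA (true, true, true) cs = (true, true, true) := by
  induction cs with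
  | nil => rfl
  | cons c cs ih =>
    simp only [List.foldl_cons, pvStepA]
    split_ifs <;> exact ih

theorem pv_fold_ttf (cs : List Char) :
    pvFin (List.foldl pvStepA (true, true, false) cs) = pvAnyDigit cs := by
  induction cs with
  | nil => rfl
  | cons c cs ih =>
    simp only [List.foldl_cons, pvStepA, pvAnyDigit, List.any_cons]
    by_cases ha : PySem.Chars.isalpha c = true
    · simp only [ha, if_true, pv_alpha_not_digit ha, Bool.false_or]
      exact ih
    · simp only [ha, if_false]
      by_cases ho : (c == '+' || c == '-' || c == '*' || c == '/') = true
      · simp only [ho, Bool.true_and, if_true, pv_op_not_digit ho, Bool.false_or]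
        exact ih
      · simp only [ho, Bool.false_and, if_false]
        by_cases hd : PySem.Chars.isdigit c = true
        · simp [hd, pv_fold_ttt, pvFin]
        · simp only [hd, Bool.false_and, if_false, Bool.false_or]
          exact ih

theorem pv_fold_tff (cs : List Char) :
    pvFin (List.foldl pvStepA (true, false, false) cs) =
      (match pvSkipOp cs with
       | none => false
       | some r => pvAnyDigit r) := by
  induction cs with
  | nil => rfl
  | cons c cs ih =>
    simp only [List.foldl_cons, pvStepA, pvSkipOp]
    by_cases ha : PySem.Chars.isalpha c = true
    · simp only [ha, if_true, pv_op_not_alpha]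
      have hop : (c == '+' || c == '-' || c == '*' || c == '/') = false := by
        by_contra h
        rw [Bool.not_eq_false] at h
        rw [pv_op_not_alpha h] at ha
        exact Bool.false_ne_true ha
      simp only [hop, if_false]
      exact ih
    · simp only [ha, if_false]
      by_cases ho : (c == '+' || c == '-' || c == '*' || c == '/') = true
      · simp only [ho, Bool.true_and, if_true]
        exact pv_fold_ttf cs
      · simp only [ho, Bool.false_and, Bool.and_false]
        exact ih

theorem pv_fold_fff (cs : List Char) :
    pvFin (List.foldl pvStepA (false, false, false) cs) =
      (match pvSkipAlpha cs with
       | none => false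
       | some r1 =>
         match pvSkipOp r1 with
         | none => false
         | some r2 => pvAnyDigit r2) := by
  induction cs with
  | nil => rfl
  | cons c cs ih =>
    simp only [List.foldl_cons, pvStepA, pvSkipAlpha]
    by_cases ha : PySem.Chars.isalpha c = true
    · simp only [ha, if_true]
      exact pv_fold_tff cs
    · simp only [ha, if_false, Bool.and_false]
      exact ih

-- ===== VERDICT (by name: the statement is the Claim_ definition above) =====
theorem passwordFits_spec : Claim_equal_passwordFits := by
  intro password _
  unfold Spec_passwordFits passwordFits passwordFits_alt
  have h := pv_fold_fff password.toList
  simp only [pvFin] at h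
  rw [← h]
  cases hb : ((List.foldl pvStepA (false, false, false) password.toList).1 &&
      (List.foldl pvStepA (false, false, false) password.toList).2.1 &&
      (List.foldl pvStepA (false, false, false) password.toList).2.2) <;> simp [hb]
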